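-- pv_equiv track=rewrite | github.com/bbroere/AdventOfCode | 2023/day_14/solution.py | cycle_grid
-- ===== SOURCE A (Python) =====
-- def cycle_grid(lines: tuple[str]) -> tuple[str]:
--     # 4 times in total
--     for _ in range(4):
--         # start by transposing
--         lines = tuple(map("".join, zip(*lines)))
--         # split by '#' which gives groups of '.' and 'O' characters
--         line_groups = [line.split("#") for line in lines]
--         # sort these groups (reversed s.t. 'O' comes before '.' and mash them together again
--         line_groups = [["".join(sorted(tuple(g), reverse=True)) for g in group] for group in line_groups]
--         # finally merge them on '#' again
--         lines = ["#".join(groups) for groups in line_groups]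
--         # now we flip all the rows, s.t. we end up with a (because we already transposed it) 90 degree clockwise rotation
--         lines = [line[::-1] for line in lines]
--     # return it as a tuple
--     return tuple(lines)
-- ===== SOURCE B (Python) =====
-- CHARS = [chr(c) for c in range(128)]
--
-- def cycle_grid(lines: tuple) -> tuple:
--     lines = list(lines)
--     for _ in range(4):
--         new_lines = []
--         for col in zip(*lines):
--             # One counting pass per transposed column: per-character counts of the
--             # current '#'-free group are flushed in ascending code order (zero counts
--             # contribute nothing); the chunks are collected and joined in reverse,
--             # which assembles the rotated, tilted row back-to-front without any
--             # sort, split or final reversal.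
--             counts = [0] * 128
--             parts = []
--             for ch in col:
--                 if ch == '#':
--                     parts.append('#' + ''.join([CHARS[c] * n for c, n in enumerate(counts) if n]))
--                     counts = [0] * 128
--                 else:
--                     counts[ord(ch)] += 1
--             row = ''.join([CHARS[c] * n for c, n in enumerate(counts) if n]) + ''.join(reversed(parts))
--             new_lines.append(row)
--         lines = new_lines
--     return tuple(lines)
-- ===== Notes on version B (the rewrite author's own statement) =====
-- stated objective: alternative
-- what changed: Replaces A's per-iteration transpose + split-on-'#' + reverse-sort + join + row-reversal pipeline by a single counting pass per transposed column: a 128-entry character counter is accumulated per '#'-free group and flushed in ascending code order while the output row is assembled back-to-front, so no split, no comparison sort and no final reversal are performed.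
import Mathlib
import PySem

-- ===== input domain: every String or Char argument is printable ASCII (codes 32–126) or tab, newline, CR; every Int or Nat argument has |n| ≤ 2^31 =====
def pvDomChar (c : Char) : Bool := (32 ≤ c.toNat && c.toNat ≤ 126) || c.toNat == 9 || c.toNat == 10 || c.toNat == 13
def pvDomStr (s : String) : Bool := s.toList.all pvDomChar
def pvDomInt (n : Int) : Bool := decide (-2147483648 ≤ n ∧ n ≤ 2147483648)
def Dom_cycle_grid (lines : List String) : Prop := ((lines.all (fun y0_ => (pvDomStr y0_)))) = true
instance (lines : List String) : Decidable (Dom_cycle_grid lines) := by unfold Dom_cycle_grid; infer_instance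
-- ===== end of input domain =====

-- B replaces A's split/reverse-sort/join/row-reversal pipeline by one counting pass per
-- transposed column that assembles the output row back-to-front (objective: alternative).

-- ===== PORT A =====
-- zip(*lines): hand-ported (PySem covers only binary zip); exact: Python's zip truncates to
-- the shortest row and yields nothing when `lines` is empty (min? of [] is none).
def pyZipStar (xss : List (List Char)) : List (List Char) :=
  match (xss.map List.length).min? with
  | none => []
  | some m => (List.range m).map (fun i => xss.map (fun r => r.getD i ' '))

-- one iteration of A's `for _ in range(4)` body, statement for statement
def cycle_step_A (ls : List (List Char)) : List (List Char) :=
  let t := pyZipStar ls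
  let groups := t.map (fun line => PySem.Chars.splitOn line ['#'])
  let sortedG := groups.map (fun gs => gs.map (fun g => PySem.List.sorted g (fun c => c) true))
  let joined := sortedG.map (fun gs => List.intercalate ['#'] gs)
  joined.map List.reverse   -- line[::-1]

def cycle_grid (lines : List String) : List String :=
  (((List.range 4).foldl (fun ls _ => cycle_step_A ls) (lines.map String.toList)).map
    fun l => String.ofList l)

-- ===== PORT B =====
-- ''.join(CHARS[c] * n for c, n in enumerate(counts) if n): the `if n` only skips
-- empty chunks, so the flush is the flatMap of the replicates over range 128
def tiltFlush (counts : Nat → Nat) : List Char :=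
  (List.range 128).flatMap (fun c => List.replicate (counts c) (Char.ofNat c))

-- B's inner loop over one column: counts is the 128-entry counter, parts the collected
-- chunks; ''.join(reversed(parts)) is parts.reverse.flatten
def tiltGo (counts : Nat → Nat) (parts : List (List Char)) : List Char → List Char
  | [] => tiltFlush counts ++ parts.reverse.flatten
  | c :: rest =>
    if c = '#' then tiltGo (fun _ => 0) (parts ++ [('#' :: tiltFlush counts)]) rest
    else tiltGo (fun n => if n = c.toNat then counts n + 1 else counts n) parts rest

def cycle_step_B (ls : List (List Char)) : List (List Char) :=
  (pyZipStar ls).map (fun col => tiltGo (fun _ => 0) [] col)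

def cycle_grid_alt (lines : List String) : List String :=
  (((List.range 4).foldl (fun ls _ => cycle_step_B ls) (lines.map String.toList)).map
    fun l => String.ofList l)

-- ===== PRECONDITION & SPEC =====
def Spec_cycle_grid (lines : List String) (out : List String) : Prop := out = cycle_grid_alt lines
instance (lines : List String) (out : List String) : Decidable (Spec_cycle_grid lines out) := by unfold Spec_cycle_grid; infer_instance

-- ===== CLAIM (what is proved, stated in full; the proofs are below) =====
def Claim_equal_cycle_grid : Prop := ∀ (lines : List String), Dom_cycle_grid lines → Spec_cycle_grid lines (cycle_grid lines)

-- ===== LEMMAS AND PROOFS =====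

-- structural description of s.split("#")
def splitHash : List Char → List (List Char)
  | [] => [[]]
  | c :: rest =>
    match splitHash rest with
    | [] => [[]]
    | g :: gs => if c = '#' then [] :: g :: gs else (c :: g) :: gs

def consHead (p : List Char) : List (List Char) → List (List Char)
  | [] => [p]
  | g :: gs => (p ++ g) :: gs

theorem splitHash_ne_nil (l : List Char) : splitHash l ≠ [] := by
  cases l with
  | nil => simp [splitHash]
  | cons c rest =>
    simp only [splitHash]
    cases splitHash rest with
    | nil => simp
    | cons g gs => by_cases h : c = '#' <;> simp [h]

theorem splitOn_go_spec (l : List Char) : ∀ (fuel : Nat) (cur : List Char) (acc : List (List Char)),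
    l.length < fuel →
    PySem.Chars.splitOn.go ['#'] fuel l cur acc = acc.reverse ++ consHead cur.reverse (splitHash l) := by
  induction l with
  | nil =>
    intro fuel cur acc hf
    match fuel, hf with
    | fuel+1, _ => simp [PySem.Chars.splitOn.go, splitHash, consHead]
  | cons c rest ih =>
    intro fuel cur acc hf
    match fuel, hf with
    | fuel+1, hf =>
      by_cases hc : c = '#'
      · subst hc
        have h1 : PySem.Chars.splitOn.go ['#'] (fuel+1) ('#'::rest) cur acc
            = PySem.Chars.splitOn.go ['#'] fuel rest [] (cur.reverse :: acc) := by
          simp [PySem.Chars.splitOn.go, List.isPrefixOf]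
        rw [h1, ih fuel [] (cur.reverse :: acc) (by simpa using hf)]
        cases hsr : splitHash rest with
        | nil => exact absurd hsr (splitHash_ne_nil rest)
        | cons g gs => simp [splitHash, hsr, consHead]
      · have h1 : PySem.Chars.splitOn.go ['#'] (fuel+1) (c::rest) cur acc
            = PySem.Chars.splitOn.go ['#'] fuel rest (c::cur) acc := by
          simp [PySem.Chars.splitOn.go, List.isPrefixOf, Ne.symm hc]
        rw [h1, ih fuel (c::cur) acc (by simpa using hf)]
        cases hsr : splitHash rest with
        | nil => exact absurd hsr (splitHash_ne_nil rest)
        | cons g gs => simp [splitHash, hsr, consHead, hc]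

theorem splitOn_eq_splitHash (l : List Char) : PySem.Chars.splitOn l ['#'] = splitHash l := by
  have h := splitOn_go_spec l (l.length+1) [] [] (by omega)
  unfold PySem.Chars.splitOn
  rw [h]
  cases hsr : splitHash l with
  | nil => exact absurd hsr (splitHash_ne_nil l)
  | cons g gs => simp [consHead]

theorem mem_splitHash {c : Char} {g l : List Char} (hg : g ∈ splitHash l) (hc : c ∈ g) : c ∈ l := by
  induction l generalizing g with
  | nil => simp [splitHash] at hg; subst hg; simp at hc
  | cons x rest ih =>
    cases hsr : splitHash rest with
    | nil => exact absurd hsr (splitHash_ne_nil rest)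
    | cons g' gs =>
      by_cases hx : x = '#'
      · simp [splitHash, hsr, hx] at hg
        rcases hg with hg | hg | hg
        · subst hg; simp at hc
        · subst hg; exact List.mem_cons_of_mem _ (ih (by rw [hsr]; exact List.mem_cons_self) hc)
        · exact List.mem_cons_of_mem _ (ih (by rw [hsr]; exact List.mem_cons_of_mem _ hg) hc)
      · simp [splitHash, hsr, hx] at hg
        rcases hg with hg | hg
        · subst hg
          rcases List.mem_cons.mp hc with h | h
          · subst h; exact List.mem_cons_self
          · exact List.mem_cons_of_mem _ (ih (by rw [hsr]; exact List.mem_cons_self) h)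
        · exact List.mem_cons_of_mem _ (ih (by rw [hsr]; exact List.mem_cons_of_mem _ hg) hc)

-- counting-sort facts
theorem toNat_ofNat_lt {k : Nat} (h : k < 128) : (Char.ofNat k).toNat = k := by
  rw [Char.toNat_ofNat, if_pos]
  exact Or.inl (by omega)

theorem ofNat_le_ofNat {k m : Nat} (hk : k < 128) (hm : m < 128) (h : k ≤ m) :
    Char.ofNat k ≤ Char.ofNat m := by
  show (Char.ofNat k).toNat ≤ (Char.ofNat m).toNat
  rw [toNat_ofNat_lt hk, toNat_ofNat_lt hm]
  exact h

theorem mem_tiltFlush {c : Char} {counts : Nat → Nat} (h : c ∈ tiltFlush counts) :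
    ∃ k, k < 128 ∧ c = Char.ofNat k := by
  simp only [tiltFlush, List.mem_flatMap, List.mem_range, List.mem_replicate] at h
  obtain ⟨k, hk, _, hc⟩ := h
  exact ⟨k, hk, hc⟩

theorem tiltFlush_aux_sorted (counts : Nat → Nat) :
    ∀ n, n ≤ 128 → List.Pairwise (· ≤ ·)
      ((List.range n).flatMap (fun c => List.replicate (counts c) (Char.ofNat c))) := by
  intro n
  induction n with
  | zero => intro _; simp
  | succ n ih =>
    intro hn
    rw [List.range_succ, List.flatMap_append]
    rw [List.pairwise_append]
    refine ⟨ih (by omega), ?_, ?_⟩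
    · simp only [List.flatMap_cons, List.flatMap_nil, List.append_nil]
      exact List.pairwise_replicate.mpr (Or.inr le_rfl)
    · intro a ha b hb
      simp only [List.mem_flatMap, List.mem_range, List.mem_replicate] at ha
      simp only [List.flatMap_cons, List.flatMap_nil, List.append_nil, List.mem_replicate] at hb
      obtain ⟨k, hk, _, hak⟩ := ha
      rw [hak, hb.2]
      exact ofNat_le_ofNat (by omega) (by omega) (by omega)

theorem tiltFlush_sorted (counts : Nat → Nat) : List.Pairwise (· ≤ ·) (tiltFlush counts) :=
  tiltFlush_aux_sorted counts 128 le_rfl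

theorem tiltFlush_inc_perm {c : Char} (hc : c.toNat < 128) (counts : Nat → Nat) :
    (tiltFlush (fun n => if n = c.toNat then counts n + 1 else counts n)).Perm (c :: tiltFlush counts) := by
  set k := c.toNat with hk
  have hsplit : List.range 128 = List.range' 0 k ++ k :: List.range' (k+1) (128 - k - 1) := by
    rw [List.range_eq_range']
    have h2 : (k : Nat) :: List.range' (k+1) (128 - k - 1) = List.range' k (128 - k) := by
      cases h : 128 - k with
      | zero => omega
      | succ m =>
        simp [List.range'_succ]
    rw [h2]
    have h3 := List.range'_append (s := 0) (m := k) (n := 128 - k) (step := 1)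
    simp only [Nat.one_mul, Nat.zero_add] at h3
    rw [h3]
    congr 1
    omega
  unfold tiltFlush
  rw [hsplit]
  simp only [List.flatMap_append, List.flatMap_cons]
  have h1 : ∀ l : List Nat, (∀ x ∈ l, x ≠ k) →
      l.flatMap (fun n => List.replicate (if n = k then counts n + 1 else counts n) (Char.ofNat n))
        = l.flatMap (fun n => List.replicate (counts n) (Char.ofNat n)) := by
    intro l hl
    apply List.flatMap_congr
    intro x hx
    rw [if_neg (hl x hx)]
  rw [h1 _ (by intro x hx; simp [List.mem_range'] at hx; omega),
      h1 _ (by intro x hx; simp [List.mem_range'] at hx; omega)]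
  simp only [if_true, List.replicate_succ]
  have hofk : Char.ofNat k = c := by rw [hk]; exact Char.ofNat_toNat c
  rw [hofk]
  simpa using List.perm_middle (a := c)
    (l₁ := (List.range' 0 k).flatMap (fun n => List.replicate (counts n) (Char.ofNat n)))
    (l₂ := List.replicate (counts k) c ++
      (List.range' (k+1) (128-k-1)).flatMap (fun n => List.replicate (counts n) (Char.ofNat n)))

theorem tiltFlush_zero : tiltFlush (fun _ => 0) = [] := by
  simp [tiltFlush]

theorem tiltFlush_foldl_perm (g : List Char) (hg : ∀ c ∈ g, c.toNat < 128) :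
    ∀ counts : Nat → Nat,
    (tiltFlush (g.foldl (fun cs c => fun n => if n = c.toNat then cs n + 1 else cs n) counts)).Perm
      (g ++ tiltFlush counts) := by
  induction g with
  | nil => intro counts; simp
  | cons c g ih =>
    intro counts
    have hc : c.toNat < 128 := hg c List.mem_cons_self
    have ih' := ih (fun x hx => hg x (List.mem_cons_of_mem _ hx)) (fun n => if n = c.toNat then counts n + 1 else counts n)
    simp only [List.foldl_cons]
    refine ih'.trans ?_
    refine (List.Perm.append_left g (tiltFlush_inc_perm hc counts)).trans ?_
    exact List.perm_middle

-- the per-group value B emits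
def csort (g : List Char) : List Char :=
  tiltFlush (g.foldl (fun cs c => fun n => if n = c.toNat then cs n + 1 else cs n) (fun _ => 0))

theorem csort_eq_rev_sorted (g : List Char) (hg : ∀ c ∈ g, c.toNat < 128) :
    csort g = (PySem.List.sorted g (fun c => c) true).reverse := by
  have hperm1 : (csort g).Perm g := by
    have h := tiltFlush_foldl_perm g hg (fun _ => 0)
    rw [tiltFlush_zero, List.append_nil] at h
    exact h
  have hperm2 : ((PySem.List.sorted g (fun c => c) true).reverse).Perm g :=
    (List.reverse_perm _).trans (PySem.List.sorted_perm g (fun c => c) true)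
  have hs1 : List.Pairwise (· ≤ ·) (csort g) := tiltFlush_sorted _
  have hs2 : List.Pairwise (· ≤ ·) ((PySem.List.sorted g (fun c => c) true).reverse) := by
    rw [List.pairwise_reverse]
    exact PySem.List.sorted_pairwise_rev g (fun c => c)
  exact List.Perm.eq_of_pairwise (fun a b _ _ h1 h2 => le_antisymm h1 h2) hs1 hs2
    (hperm1.trans hperm2.symm)

-- suffix J gs = the part of the finished row contributed by the groups after the first
def rowSuffix (gs : List (List Char)) : List Char :=
  gs.reverse.flatMap (fun h => csort h ++ ['#'])

theorem rowSuffix_cons (h : List Char) (t : List (List Char)) :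
    rowSuffix (h :: t) = rowSuffix t ++ (csort h ++ ['#']) := by
  simp [rowSuffix, List.flatMap_append]

theorem tiltGo_eq (row : List Char) : ∀ (counts : Nat → Nat) (parts : List (List Char)),
    tiltGo counts parts row =
      rowSuffix (splitHash row).tail ++
        tiltFlush ((splitHash row).headI.foldl (fun cs c => fun n => if n = c.toNat then cs n + 1 else cs n) counts) ++ parts.reverse.flatten := by
  induction row with
  | nil => intro counts parts; simp [tiltGo, splitHash, rowSuffix]
  | cons c rest ih =>
    intro counts parts
    cases hsr : splitHash rest with
    | nil => exact absurd hsr (splitHash_ne_nil rest)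
    | cons g gs =>
      by_cases hc : c = '#'
      · subst hc
        simp only [tiltGo]
        rw [ih (fun _ => 0) (parts ++ [('#' :: tiltFlush counts)])]
        simp [splitHash, hsr, rowSuffix_cons, csort]
      · simp only [tiltGo, if_neg hc]
        rw [ih (fun n => if n = c.toNat then counts n + 1 else counts n) parts]
        simp [splitHash, hsr, hc]

theorem intercalate_hash_cons (g h : List Char) (t : List (List Char)) :
    List.intercalate ['#'] (g :: h :: t) = g ++ '#' :: List.intercalate ['#'] (h :: t) := by
  simp [List.intercalate]

theorem rowA_eq (g : List Char) (gs : List (List Char))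
    (h : ∀ x ∈ g :: gs, ∀ c ∈ x, c.toNat < 128) :
    (List.intercalate ['#'] ((g :: gs).map (fun x => PySem.List.sorted x (fun c => c) true))).reverse
      = rowSuffix gs ++ csort g := by
  induction gs generalizing g with
  | nil =>
    simp only [List.map_cons, List.map_nil]
    rw [show List.intercalate ['#'] [PySem.List.sorted g (fun c => c) true] = PySem.List.sorted g (fun c => c) true by simp [List.intercalate]]
    rw [← csort_eq_rev_sorted g (h g List.mem_cons_self)]
    simp [rowSuffix]
  | cons x t ih =>
    have hx : ∀ y ∈ x :: t, ∀ c ∈ y, c.toNat < 128 := by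
      intro y hy; exact h y (List.mem_cons_of_mem _ hy)
    simp only [List.map_cons] at ih ⊢
    rw [show (PySem.List.sorted g (fun c => c) true :: PySem.List.sorted x (fun c => c) true :: List.map (fun x => PySem.List.sorted x (fun c => c) true) t)
          = (PySem.List.sorted g (fun c => c) true) :: ((x :: t).map (fun x => PySem.List.sorted x (fun c => c) true)) by simp]
    rw [show ((x :: t).map (fun x => PySem.List.sorted x (fun c => c) true)) = (PySem.List.sorted x (fun c => c) true) :: (t.map (fun x => PySem.List.sorted x (fun c => c) true)) by simp]
    rw [intercalate_hash_cons]
    rw [List.reverse_append, List.reverse_cons]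
    rw [ih x hx]
    rw [← csort_eq_rev_sorted g (h g List.mem_cons_self)]
    rw [rowSuffix_cons]
    simp

theorem row_eq (row : List Char) (h : ∀ c ∈ row, c.toNat < 128) :
    (List.intercalate ['#'] ((PySem.Chars.splitOn row ['#']).map (fun g => PySem.List.sorted g (fun c => c) true))).reverse
      = tiltGo (fun _ => 0) [] row := by
  rw [splitOn_eq_splitHash]
  cases hsr : splitHash row with
  | nil => exact absurd hsr (splitHash_ne_nil row)
  | cons g gs =>
    have hchars : ∀ x ∈ g :: gs, ∀ c ∈ x, c.toNat < 128 := by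
      intro x hx c hc
      exact h c (mem_splitHash (by rw [hsr]; exact hx) hc)
    rw [rowA_eq g gs hchars, tiltGo_eq row (fun _ => 0) [], hsr]
    simp [csort]

theorem mem_pyZipStar {ls : List (List Char)} {col : List Char} (h : col ∈ pyZipStar ls)
    {c : Char} (hc : c ∈ col) : c = ' ' ∨ ∃ r ∈ ls, c ∈ r := by
  unfold pyZipStar at h
  cases hm : (ls.map List.length).min? with
  | none => rw [hm] at h; simp at h
  | some m =>
    rw [hm] at h
    simp only [List.mem_map, List.mem_range] at h
    obtain ⟨i, _, hcol⟩ := h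
    rw [← hcol] at hc
    simp only [List.mem_map] at hc
    obtain ⟨r, hr, hcr⟩ := hc
    rw [List.getD_eq_getElem?_getD] at hcr
    cases hri : r[i]? with
    | none =>
      rw [hri] at hcr
      left
      exact hcr.symm
    | some x =>
      rw [hri] at hcr
      right
      refine ⟨r, hr, ?_⟩
      rw [← hcr]
      simpa using List.mem_of_getElem? hri

theorem step_eq (ls : List (List Char)) (h : ∀ r ∈ ls, ∀ c ∈ r, c.toNat < 128) :
    cycle_step_A ls = cycle_step_B ls := by
  unfold cycle_step_A cycle_step_B
  simp only [List.map_map]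
  apply List.map_congr_left
  intro col hcol
  simp only [Function.comp]
  apply row_eq
  intro c hc
  rcases mem_pyZipStar hcol hc with h1 | ⟨r, hr, hcr⟩
  · rw [h1]; decide
  · exact h r hr c hcr

theorem tiltGo_chars (col : List Char) : ∀ (counts : Nat → Nat) (parts : List (List Char)),
    (∀ p ∈ parts, ∀ c ∈ p, c.toNat < 128) → ∀ c ∈ tiltGo counts parts col, c.toNat < 128 := by
  induction col with
  | nil =>
    intro counts parts hparts c hc
    simp only [tiltGo, List.mem_append] at hc
    rcases hc with hc | hc
    · obtain ⟨k, hk, hck⟩ := mem_tiltFlush hc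
      rw [hck, toNat_ofNat_lt hk]; exact hk
    · rw [List.mem_flatten] at hc
      obtain ⟨p, hp, hcp⟩ := hc
      exact hparts p (List.mem_reverse.mp hp) c hcp
  | cons x rest ih =>
    intro counts parts hparts c hc
    by_cases hx : x = '#'
    · subst hx
      simp only [tiltGo] at hc
      refine ih _ _ ?_ c hc
      intro p hp d hd
      rcases List.mem_append.mp hp with hp | hp
      · exact hparts p hp d hd
      · simp only [List.mem_singleton] at hp
        subst hp
        rcases List.mem_cons.mp hd with hd | hd
        · rw [hd]; decide
        · obtain ⟨k, hk, hck⟩ := mem_tiltFlush hd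
          rw [hck, toNat_ofNat_lt hk]; exact hk
    · simp only [tiltGo, if_neg hx] at hc
      exact ih _ _ hparts c hc

theorem step_B_inv (ls : List (List Char)) :
    ∀ r ∈ cycle_step_B ls, ∀ c ∈ r, c.toNat < 128 := by
  intro r hr c hc
  unfold cycle_step_B at hr
  simp only [List.mem_map] at hr
  obtain ⟨col, _, hcol⟩ := hr
  rw [← hcol] at hc
  exact tiltGo_chars col (fun _ => 0) [] (by simp) c hc

-- ===== VERDICT (by name: the statement is the Claim_ definition above) =====
theorem cycle_grid_spec : Claim_equal_cycle_grid := by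
  intro lines hdom
  unfold Spec_cycle_grid cycle_grid cycle_grid_alt
  have h0 : ∀ r ∈ lines.map String.toList, ∀ c ∈ r, c.toNat < 128 := by
    intro r hr c hc
    simp only [List.mem_map] at hr
    obtain ⟨s, hs, hrs⟩ := hr
    unfold Dom_cycle_grid at hdom
    rw [List.all_eq_true] at hdom
    have := hdom s hs
    simp only [pvDomStr, List.all_eq_true] at this
    have hcs := this c (by rw [hrs]; exact hc)
    simp only [pvDomChar] at hcs
    simp only [Bool.or_eq_true, Bool.and_eq_true, decide_eq_true_eq, beq_iff_eq] at hcs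
    omega
  rw [show List.range 4 = [0,1,2,3] from rfl]
  simp only [List.foldl_cons, List.foldl_nil]
  set ls0 := lines.map String.toList with hls0
  rw [step_eq ls0 h0,
      step_eq _ (step_B_inv ls0),
      step_eq _ (step_B_inv _),
      step_eq _ (step_B_inv _)]
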